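-- pv_equiv track=rewrite | github.com/klinucsd/mediator | src/data_loader/wfs_loader.py | __get_sort_by
-- ===== SOURCE A (Python) =====
-- def __get_sort_by(fields):
--     id_fields = [key for key, value in fields.items() if
--                  key.lower().endswith('id') and (value == 'long' or value == 'int' or value == 'double')]
--     if id_fields:
--         return id_fields[0]
--
--     string_id_fields = [key for key, value in fields.items() if key.lower().endswith('id') and value == 'string']
--     if string_id_fields:
--         return string_id_fields[0]
--
--     return list(fields.keys())[0]
-- ===== SOURCE B (Python) =====
-- def __get_sort_by(fields):
--     first_numeric_id = None
--     first_string_id = None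
--     first_key = None
--     for key, value in fields.items():
--         if first_key is None:
--             first_key = key
--         if key.lower().endswith('id'):
--             if first_numeric_id is None and value in ('long', 'int', 'double'):
--                 first_numeric_id = key
--             elif first_string_id is None and value == 'string':
--                 first_string_id = key
--     if first_numeric_id is not None:
--         return first_numeric_id
--     if first_string_id is not None:
--         return first_string_id
--     return first_key
-- ===== Notes on version B (the rewrite author's own statement) =====
-- stated objective: alternative
-- what changed: Replaces the two full list-comprehension passes plus a keys-list fallback by a single pass over fields.items() that records the first numeric-id key, the first string-id key and the first key, choosing among them afterwards.
-- outside the precondition, e.g. on __get_sort_by({}): A raises IndexError, B returns None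
import Mathlib
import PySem

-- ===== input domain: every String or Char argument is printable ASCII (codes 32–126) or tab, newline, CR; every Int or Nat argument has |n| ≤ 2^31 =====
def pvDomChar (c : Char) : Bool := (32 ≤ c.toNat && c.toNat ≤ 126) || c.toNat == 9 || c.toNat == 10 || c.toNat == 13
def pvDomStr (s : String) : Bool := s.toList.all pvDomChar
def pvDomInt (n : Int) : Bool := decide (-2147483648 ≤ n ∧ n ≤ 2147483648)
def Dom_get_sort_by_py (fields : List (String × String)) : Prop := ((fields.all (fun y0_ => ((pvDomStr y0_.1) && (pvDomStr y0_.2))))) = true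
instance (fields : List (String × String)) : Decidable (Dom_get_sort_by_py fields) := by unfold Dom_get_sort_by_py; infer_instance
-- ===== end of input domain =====

-- B is a single forward pass keeping the first key of each category instead of A's two
-- filter passes plus a keys fallback (same cost; equivalence is about the return value).

-- shared tests: key.lower().endswith('id') and the numeric-type test
def pvEndsId (k : String) : Bool := PySem.Str.endswith (PySem.Str.lower k) "id"
def pvNumType (v : String) : Bool := v == "long" || v == "int" || v == "double"

-- ===== PORT A =====
def get_sort_by_py (fields : List (String × String)) : String :=
  let id_fields := (fields.filter (fun kv => pvEndsId kv.1 && pvNumType kv.2)).map Prod.fst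
  match id_fields with
  | k :: _ => k
  | [] =>
    let string_id_fields := (fields.filter (fun kv => pvEndsId kv.1 && kv.2 == "string")).map Prod.fst
    match string_id_fields with
    | k :: _ => k
    | [] => (fields.map Prod.fst).headD ""   -- list(fields.keys())[0]; raises IndexError on {} (excluded by Pre_)

-- ===== PORT B =====
-- one fold step of Source B's loop over (first_numeric_id, first_string_id, first_key)
def pvStep (acc : Option String × Option String × Option String) (kv : String × String) :
    Option String × Option String × Option String :=
  let f := if acc.2.2.isNone then some kv.1 else acc.2.2
  if pvEndsId kv.1 then
    if acc.1.isNone && pvNumType kv.2 then (some kv.1, acc.2.1, f)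
    else if acc.2.1.isNone && kv.2 == "string" then (acc.1, some kv.1, f)
    else (acc.1, acc.2.1, f)
  else (acc.1, acc.2.1, f)

def get_sort_by_py_alt (fields : List (String × String)) : String :=
  let r := fields.foldl pvStep (none, none, none)
  match r.1 with
  | some k => k
  | none =>
    match r.2.1 with
    | some k => k
    | none => r.2.2.getD ""   -- first_key; Source B returns None here, only on {} (excluded by Pre_)

-- ===== PRECONDITION & SPEC =====
-- Pre_ excludes the empty dict, on which A raises IndexError, and association lists with
-- duplicate keys, which do not represent a Python dict (dict construction collapses
-- duplicates, so the raw-list iteration of the ports has no Python counterpart there).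
def Pre_get_sort_by_py (fields : List (String × String)) : Prop :=
  fields ≠ [] ∧ (fields.map Prod.fst).Nodup
instance (fields : List (String × String)) : Decidable (Pre_get_sort_by_py fields) := by
  unfold Pre_get_sort_by_py; infer_instance

def pvWitness_get_sort_by_py : (List (String × String)) := [("aid", "string"), ("bid", "long")]

def Spec_get_sort_by_py (fields : List (String × String)) (out : String) : Prop := out = get_sort_by_py_alt fields
instance (fields : List (String × String)) (out : String) : Decidable (Spec_get_sort_by_py fields out) := by unfold Spec_get_sort_by_py; infer_instance

-- ===== CLAIM (what is proved, stated in full; the proofs are below) =====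
def Claim_equal_get_sort_by_py : Prop := ∀ (fields : List (String × String)), Dom_get_sort_by_py fields → Pre_get_sort_by_py fields → Spec_get_sort_by_py fields (get_sort_by_py fields)

-- ===== LEMMAS AND PROOFS =====

-- the fold computes, for arbitrary starting accumulators, the first match of each category
theorem pvStep_fold_spec (l : List (String × String)) (n s f : Option String) :
    l.foldl pvStep (n, s, f) =
      (n.or (((l.filter (fun kv => pvEndsId kv.1 && pvNumType kv.2)).map Prod.fst).head?),
       s.or (((l.filter (fun kv => pvEndsId kv.1 && kv.2 == "string")).map Prod.fst).head?),
       f.or ((l.map Prod.fst).head?)) := by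
  induction l generalizing n s f with
  | nil => simp
  | cons kv l ih =>
    by_cases he : pvEndsId kv.1 = true
    · by_cases hn : pvNumType kv.2 = true
      · have hs : (kv.2 == "string") = false := by
          revert hn; unfold pvNumType
          by_cases h : kv.2 = "string" <;> simp [h]
        cases n with
        | none =>
          simp [List.foldl, pvStep, he, hn, hs, ih]
          cases f <;> simp
        | some a =>
          simp [List.foldl, pvStep, he, hn, hs, ih]
          cases f <;> simp
      · by_cases hs : (kv.2 == "string") = true
        · cases s with
          | none =>
            simp [List.foldl, pvStep, he, hn, hs, ih]
            cases f <;> simp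
          | some a =>
            simp [List.foldl, pvStep, he, hn, hs, ih]
            cases f <;> simp
        · simp [List.foldl, pvStep, he, hn, hs, ih]
          cases f <;> simp
    · have hn : (pvEndsId kv.1 && pvNumType kv.2) = false := by simp [he]
      have hs : (pvEndsId kv.1 && (kv.2 == "string")) = false := by simp [he]
      simp [List.foldl, pvStep, he, hn, ih]
      cases f <;> simp

-- ===== VERDICT (by name: the statement is the Claim_ definition above) =====
theorem get_sort_by_py_spec : Claim_equal_get_sort_by_py := by
  intro fields _ _
  unfold Spec_get_sort_by_py get_sort_by_py get_sort_by_py_alt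
  rw [pvStep_fold_spec]
  simp only [Option.none_or]
  cases hN : ((fields.filter (fun kv => pvEndsId kv.1 && pvNumType kv.2)).map Prod.fst) with
  | cons k t => simp
  | nil =>
    cases hS : ((fields.filter (fun kv => pvEndsId kv.1 && kv.2 == "string")).map Prod.fst) with
    | cons k t => simp [hS]
    | nil =>
      simp only [hN, hS]
      cases fields <;> simp
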